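-- pv_equiv track=rewrite | github.com/nadia-paz/ds-learning | python/data_structures/exercises.py | exercise4
-- ===== SOURCE A (Python) =====
-- def exercise4(n):
--     if n == 1:
--         return n
--     else:
--         # calculate the side of the square were polygon fits
--         side = n * 2 - 1
--         # calculate the empty area in each corner of the square
--         m = 0
--         for i in range(1, n+1):
--             m = (i-1) + m
--     # calculate the area of the polygon by finding the area of the square
--     # and substracting the 4 empty areas in corners
--     return side * side - 4 * m
-- ===== SOURCE B (Python) =====
-- def exercise4(n):
--     # closed form: (2n-1)^2 - 4*(n(n-1)/2) = 2n^2 - 2n + 1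
--     return 2 * n * (n - 1) + 1
-- ===== Notes on version B (the rewrite author's own statement) =====
-- stated objective: faster
-- what changed: replaces the O(n) corner-area summation loop with a closed-form quadratic polynomial
-- outside the precondition, e.g. on exercise4(-1): A returns 9, B returns 5
import Mathlib
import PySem

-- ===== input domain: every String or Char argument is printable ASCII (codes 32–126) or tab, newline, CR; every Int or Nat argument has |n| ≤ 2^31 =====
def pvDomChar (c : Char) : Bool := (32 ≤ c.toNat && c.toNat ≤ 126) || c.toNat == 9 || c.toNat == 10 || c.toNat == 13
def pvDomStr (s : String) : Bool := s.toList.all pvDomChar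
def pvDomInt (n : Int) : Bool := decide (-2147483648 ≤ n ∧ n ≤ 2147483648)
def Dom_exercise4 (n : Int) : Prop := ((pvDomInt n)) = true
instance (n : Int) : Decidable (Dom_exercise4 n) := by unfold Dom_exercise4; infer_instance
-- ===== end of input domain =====

-- B replaces A's linear corner-area summation loop with a closed-form quadratic polynomial (measurably faster, asymptotic).
-- Pre_ restricts to the natural domain n ≥ 0: for negative n the polygon/square picture is meaningless and A's
-- value (2n-1)^2 (the loop never runs) is an artefact of the empty range.


-- ===== PORT A =====
def exercise4 (n : Int) : Int :=
  if n == 1 then n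
  else
    let side := n * 2 - 1
    let m := (PySem.List.pyRange 1 (n + 1) 1).foldl (fun m i => (i - 1) + m) 0
    side * side - 4 * m

-- ===== PORT B =====
def exercise4_alt (n : Int) : Int := 2 * n * (n - 1) + 1

-- ===== PRECONDITION & SPEC =====
-- Pre_ excludes negative n (outside the geometric task's natural domain), where A's returned
-- value (2n-1)^2 comes from the loop body never executing.
def Pre_exercise4 (n : Int) : Prop := 0 ≤ n
instance (n : Int) : Decidable (Pre_exercise4 n) := by unfold Pre_exercise4; infer_instance
def pvWitness_exercise4 : Int := (3)

def Spec_exercise4 (n : Int) (out : Int) : Prop := out = exercise4_alt n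
instance (n : Int) (out : Int) : Decidable (Spec_exercise4 n out) := by unfold Spec_exercise4; infer_instance

-- ===== CLAIM (what is proved, stated in full; the proofs are below) =====
def Claim_equal_exercise4 : Prop := ∀ (n : Int), Dom_exercise4 n → Pre_exercise4 n → Spec_exercise4 n (exercise4 n)

-- ===== LEMMAS AND PROOFS =====

-- twice A's loop sum over range(1, k+1) equals k*(k-1)
theorem two_mul_loop (k : Nat) :
    2 * (PySem.List.pyRange 1 ((k : Int) + 1) 1).foldl (fun m i => (i - 1) + m) 0 = (k : Int) * ((k : Int) - 1) := by
  induction k with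
  | zero => simp [PySem.List.pyRange_one_eq_nil]
  | succ k ih =>
    have h : PySem.List.pyRange 1 ((k : Int) + 1 + 1) 1
        = PySem.List.pyRange 1 ((k : Int) + 1) 1 ++ [(k : Int) + 1] := by
      exact PySem.List.pyRange_one_succ_right (by omega)
    push_cast
    rw [h, List.foldl_append]
    simp only [List.foldl]
    nlinarith [ih]

theorem exercise4_spec : Claim_equal_exercise4 := by
  intro n _ hpre
  unfold Spec_exercise4 exercise4 exercise4_alt
  by_cases h1 : n = 1
  · simp [h1]
  · simp only [beq_iff_eq, h1, if_false]
    obtain ⟨k, rfl⟩ := Int.eq_ofNat_of_zero_le hpre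
    have := two_mul_loop k
    nlinarith [this]
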